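-- pv_equiv track=rewrite | github.com/jjelosua/ML_audio_classification | preprocess/backup/featurize.py | extract_chunks
-- ===== SOURCE A (Python) =====
-- def extract_chunks(smooth_data):
--     """
--     Extract silent and nonsilent chunks.
--     """
--     silence = smooth_data[0] == 0
--
--     if silence:
--         # Track [onset sample number, length] for each silent chunk
--         silences = [[0, 0]]
--         nonsilences = []
--     else:
--         # Track (onset sample number, amplitudes) for each nonsilent chunk
--         nonsilences = [(0, [])]
--         silences = []
--
--     for i, amp in enumerate(smooth_data):
--         if amp > 0:
--             # Entering a new nonsilent chunk
--             if silence: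
--                 silence = False
--                 nonsilences.append((i, [amp]))
--             else:
--                 nonsilences[-1][1].append(amp)
--         else:
--             # Entering a new silent chunk
--             if not silence:
--                 silence = True
--                 silences.append([i, 1])
--             else:
--                 silences[-1][1] += 1
--     return silences, nonsilences
-- ===== SOURCE B (Python) =====
-- def extract_chunks(smooth_data):
--     """
--     Extract silent and nonsilent chunks.
--
--     Two-pointer run scanner: each maximal run of positive (nonsilent) or
--     non-positive (silent) samples is emitted in one step.
--     """
--     silences = []
--     nonsilences = []
--     i, n = 0, len(smooth_data)
--     while i < n:
--         j = i + 1
--         if smooth_data[i] > 0: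
--             while j < n and smooth_data[j] > 0:
--                 j += 1
--             nonsilences.append((i, smooth_data[i:j]))
--         else:
--             while j < n and smooth_data[j] <= 0:
--                 j += 1
--             silences.append([i, j - i])
--         i = j
--     return silences, nonsilences
-- ===== Notes on version B (the rewrite author's own statement) =====
-- stated objective: alternative
-- what changed: A runs an element-by-element state machine that seeds a chunk by testing the first sample for equality with zero and mutates the last chunk on every sample; B is a two-pointer run scanner that emits each maximal positive / non-positive run in one step (slice for nonsilent, length for silent); smoothed amplitude data is nonnegative, so Pre_ excludes the inputs where a negative sample changes A's output — those with a negative first sample, where A's seed survives as a spurious empty nonsilent chunk — and the empty list, on which A raises IndexError.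
-- outside the precondition, e.g. on extract_chunks([-1]): A returns ([[0, 1]], [(0, [])]), B returns ([[0, 1]], []); on extract_chunks([]): A raises IndexError, B returns ([], [])
import Mathlib
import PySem

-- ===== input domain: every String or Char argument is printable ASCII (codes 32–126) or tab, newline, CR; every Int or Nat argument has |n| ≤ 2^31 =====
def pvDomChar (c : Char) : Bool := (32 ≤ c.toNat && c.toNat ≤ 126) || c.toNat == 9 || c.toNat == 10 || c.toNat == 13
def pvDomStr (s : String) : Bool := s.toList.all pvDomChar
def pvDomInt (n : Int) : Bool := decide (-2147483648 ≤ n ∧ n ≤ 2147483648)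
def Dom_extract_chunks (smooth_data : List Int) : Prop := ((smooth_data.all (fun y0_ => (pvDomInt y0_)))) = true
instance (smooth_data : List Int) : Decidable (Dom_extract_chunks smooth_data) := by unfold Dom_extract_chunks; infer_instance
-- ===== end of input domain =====

-- B groups the samples into maximal runs with a two-pointer scan instead of A's per-sample
-- state machine; on a negative first sample A keeps a spurious empty nonsilent chunk that B
-- omits (stated as D_ below).

-- ===== PORT A =====
-- nonsilences[-1][1].append(amp): walk to the last pair and append amp to its amplitude list
def pvAppendLastAmp (l : List (Int × List Int)) (x : Int) : List (Int × List Int) :=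
  match l with
  | [] => []
  | (o, a) :: es => if es.isEmpty then (o, a ++ [x]) :: es else (o, a) :: pvAppendLastAmp es x

-- silences[-1][1] += 1: walk to the last entry [onset, len] and bump its length
def pvBumpLast (l : List (List Int)) : List (List Int) :=
  match l with
  | [] => []
  | e :: es =>
    if es.isEmpty then (match e with | o :: c :: r => o :: (c + 1) :: r | z => z) :: es
    else e :: pvBumpLast es

-- the body of A's for-loop over enumerate(smooth_data); state = (silence, silences, nonsilences)
def pvStepA (st : Bool × List (List Int) × List (Int × List Int)) (p : Int × Int) :
    Bool × List (List Int) × List (Int × List Int) :=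
  if p.2 > 0 then
    if st.1 then (false, st.2.1, st.2.2 ++ [(p.1, [p.2])])
    else (st.1, st.2.1, pvAppendLastAmp st.2.2 p.2)
  else
    if !st.1 then (true, st.2.1 ++ [[p.1, 1]], st.2.2)
    else (st.1, pvBumpLast st.2.1, st.2.2)

def extract_chunks (smooth_data : List Int) : List (List Int) × (List (Int × List Int)) :=
  match smooth_data with
  | [] => ([], [])   -- Python raises IndexError on smooth_data[0]; excluded by Pre_
  | x :: _ =>
    let init : Bool × List (List Int) × List (Int × List Int) :=
      if x == 0 then (true, [[0, 0]], []) else (false, [], [(0, [])])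
    let fin := (PySem.List.enumerate smooth_data).foldl pvStepA init
    (fin.2.1, fin.2.2)

-- ===== PORT B =====
-- B's outer while loop: at each position take the maximal run of the current kind
-- (the inner while j < n ... scans = takeWhile / dropWhile on the rest) and emit it
def pvGoB (xs : List Int) (off : Int) : List (List Int) × (List (Int × List Int)) :=
  match xs with
  | [] => ([], [])
  | x :: rest =>
    if 0 < x then
      let run := x :: rest.takeWhile (fun y => 0 < y)
      let r := pvGoB (rest.dropWhile (fun y => 0 < y)) (off + run.length)
      (r.1, (off, run) :: r.2)
    else
      let run := x :: rest.takeWhile (fun y => y ≤ 0)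
      let r := pvGoB (rest.dropWhile (fun y => y ≤ 0)) (off + run.length)
      ([off, run.length] :: r.1, r.2)
termination_by xs.length
decreasing_by
  · simpa [Nat.lt_succ_iff] using List.length_dropWhile_le (p := fun y => decide (0 < y)) (l := rest)
  · simpa [Nat.lt_succ_iff] using List.length_dropWhile_le (p := fun y => decide (y ≤ 0)) (l := rest)

def extract_chunks_alt (smooth_data : List Int) : List (List Int) × (List (Int × List Int)) :=
  pvGoB smooth_data 0

-- ===== PRECONDITION & SPEC =====
-- A reads the first sample before the loop, so the empty list raises IndexError and is
-- excluded. Smoothed amplitude data is nonnegative; Pre_ also excludes the inputs where a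
-- negative sample changes A's output — exactly those whose first sample is negative, where
-- A's seed chunk (it tests smooth_data[0] == 0, not > 0) survives as a spurious empty
-- nonsilent chunk (0, []) that no natural run scanner produces.
def Pre_extract_chunks (smooth_data : List Int) : Prop := smooth_data ≠ [] ∧ 0 ≤ smooth_data.headI
instance (smooth_data : List Int) : Decidable (Pre_extract_chunks smooth_data) := by unfold Pre_extract_chunks; infer_instance
def pvWitness_extract_chunks : List Int := [0, 3, 0]

def Spec_extract_chunks (smooth_data : List Int) (out : List (List Int) × (List (Int × List Int))) : Prop := out = extract_chunks_alt smooth_data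
instance (smooth_data : List Int) (out : List (List Int) × (List (Int × List Int))) : Decidable (Spec_extract_chunks smooth_data out) := by unfold Spec_extract_chunks; infer_instance

-- ===== CLAIM (what is proved, stated in full; the proofs are below) =====
def Claim_equal_extract_chunks : Prop := ∀ (smooth_data : List Int), Dom_extract_chunks smooth_data → Pre_extract_chunks smooth_data → Spec_extract_chunks smooth_data (extract_chunks smooth_data)

-- ===== LEMMAS AND PROOFS =====

theorem pvAppendLastAmp_app (l : List (Int × List Int)) (o : Int) (a : List Int) (x : Int) :
    pvAppendLastAmp (l ++ [(o, a)]) x = l ++ [(o, a ++ [x])] := by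
  induction l with
  | nil => simp [pvAppendLastAmp]
  | cons e es ih =>
    obtain ⟨o', a'⟩ := e
    simp [pvAppendLastAmp, ih]

theorem pvBumpLast_app (l : List (List Int)) (o c : Int) :
    pvBumpLast (l ++ [[o, c]]) = l ++ [[o, c + 1]] := by
  induction l with
  | nil => simp [pvBumpLast]
  | cons e es ih => simp [pvBumpLast, ih]

-- one-step unfoldings of pvGoB (it is defined by well-founded recursion)
theorem pvGoB_pos (x : Int) (rest : List Int) (off : Int) (hx : 0 < x) :
    pvGoB (x :: rest) off =
      ((pvGoB (rest.dropWhile (fun y => 0 < y)) (off + (x :: rest.takeWhile (fun y => 0 < y)).length)).1,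
       (off, x :: rest.takeWhile (fun y => 0 < y)) ::
         (pvGoB (rest.dropWhile (fun y => 0 < y)) (off + (x :: rest.takeWhile (fun y => 0 < y)).length)).2) := by
  rw [pvGoB.eq_def]; simp [hx]

theorem pvGoB_nonpos (x : Int) (rest : List Int) (off : Int) (hx : ¬ 0 < x) :
    pvGoB (x :: rest) off =
      ([off, ((x :: rest.takeWhile (fun y => y ≤ 0)).length : Int)] ::
         (pvGoB (rest.dropWhile (fun y => y ≤ 0)) (off + (x :: rest.takeWhile (fun y => y ≤ 0)).length)).1,
       (pvGoB (rest.dropWhile (fun y => y ≤ 0)) (off + (x :: rest.takeWhile (fun y => y ≤ 0)).length)).2) := by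
  rw [pvGoB.eq_def]; simp [hx]

-- A's loop from an open nonsilent chunk (o, a) / an open silent chunk [o, c] equals B's
-- run scanner on the rest, with the first maximal run merged into the open chunk.
theorem pvMain (xs : List Int) :
    (∀ (off o : Int) (a : List Int) (S : List (List Int)) (NS : List (Int × List Int)),
      ((PySem.List.enumerate xs off).foldl pvStepA (false, S, NS ++ [(o, a)])).2 =
        (S ++ (pvGoB (xs.dropWhile (fun y => 0 < y)) (off + (xs.takeWhile (fun y => 0 < y)).length)).1,
         NS ++ (o, a ++ xs.takeWhile (fun y => 0 < y)) ::
           (pvGoB (xs.dropWhile (fun y => 0 < y)) (off + (xs.takeWhile (fun y => 0 < y)).length)).2))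
    ∧
    (∀ (off o c : Int) (S : List (List Int)) (NS : List (Int × List Int)),
      ((PySem.List.enumerate xs off).foldl pvStepA (true, S ++ [[o, c]], NS)).2 =
        (S ++ [o, c + ((xs.takeWhile (fun y => y ≤ 0)).length : Int)] ::
           (pvGoB (xs.dropWhile (fun y => y ≤ 0)) (off + (xs.takeWhile (fun y => y ≤ 0)).length)).1,
         NS ++ (pvGoB (xs.dropWhile (fun y => y ≤ 0)) (off + (xs.takeWhile (fun y => y ≤ 0)).length)).2)) := by
  induction xs with
  | nil =>
    constructor <;> intros <;> simp [PySem.List.enumerate, pvGoB]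
  | cons x rest ih =>
    constructor
    · intro off o a S NS
      rw [PySem.List.enumerate_cons, List.foldl_cons]
      by_cases hx : 0 < x
      · have hstep : pvStepA (false, S, NS ++ [(o, a)]) (off, x) = (false, S, NS ++ [(o, a ++ [x])]) := by
          simp [pvStepA, hx, pvAppendLastAmp_app]
        rw [hstep, ih.1]
        simp only [List.takeWhile_cons, List.dropWhile_cons, hx, decide_true, if_true,
          List.length_cons, List.append_assoc, List.cons_append, List.nil_append]
        push_cast
        ring_nf
      · have hx' : x ≤ 0 := le_of_not_gt hx
        have hstep : pvStepA (false, S, NS ++ [(o, a)]) (off, x) = (true, S ++ [[off, 1]], NS ++ [(o, a)]) := by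
          simp [pvStepA, hx]
        rw [hstep, ih.2 (off + 1) off 1 S (NS ++ [(o, a)])]
        simp only [List.takeWhile_cons, List.dropWhile_cons, hx, decide_false,
          Bool.false_eq_true, if_false, List.length_nil, Nat.cast_zero, add_zero,
          List.append_assoc, List.cons_append, List.nil_append]
        rw [pvGoB_nonpos x rest off hx]
        simp only [List.length_cons, List.append_nil]
        push_cast
        ring_nf
    · intro off o c S NS
      rw [PySem.List.enumerate_cons, List.foldl_cons]
      by_cases hx : 0 < x
      · have hx' : ¬ x ≤ 0 := not_le.mpr hx
        have hstep : pvStepA (true, S ++ [[o, c]], NS) (off, x) = (false, S ++ [[o, c]], NS ++ [(off, [x])]) := by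
          simp [pvStepA, hx]
        rw [hstep, ih.1 (off + 1) off [x] (S ++ [[o, c]]) NS]
        simp only [List.takeWhile_cons, List.dropWhile_cons, hx', decide_false,
          Bool.false_eq_true, if_false, List.length_nil, Nat.cast_zero, add_zero,
          List.append_assoc, List.cons_append, List.nil_append]
        rw [pvGoB_pos x rest off hx]
        simp only [List.length_cons]
        push_cast
        ring_nf
      · have hx' : x ≤ 0 := le_of_not_gt hx
        have hstep : pvStepA (true, S ++ [[o, c]], NS) (off, x) = (true, S ++ [[o, c + 1]], NS) := by
          simp [pvStepA, hx, pvBumpLast_app]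
        rw [hstep, ih.2 (off + 1) o (c + 1) S NS]
        simp only [List.takeWhile_cons, List.dropWhile_cons, hx', decide_true, if_true,
          List.length_cons]
        push_cast
        ring_nf

-- the final state's silences/nonsilences, from the seed chunk, via pvMain
theorem extract_chunks_eq_of_zero (rest : List Int) :
    extract_chunks (0 :: rest) = pvGoB (0 :: rest) 0 := by
  have h := (pvMain ((0 : Int) :: rest)).2 0 0 0 [] []
  simp only [List.nil_append] at h
  simp only [extract_chunks]
  rw [if_pos (show ((0 : Int) == 0) = true by decide)]
  rw [h, pvGoB_nonpos 0 rest 0 (by norm_num)]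
  simp

theorem extract_chunks_eq_of_pos (x : Int) (rest : List Int) (hx : 0 < x) :
    extract_chunks (x :: rest) = pvGoB (x :: rest) 0 := by
  have h := (pvMain (x :: rest)).1 0 0 [] [] []
  simp only [List.nil_append] at h
  simp only [extract_chunks]
  rw [if_neg (by simp [hx.ne'])]
  rw [h, pvGoB_pos x rest 0 hx]
  simp [hx]

-- ===== VERDICT (by name: the statement is the Claim_ definition above) =====
theorem extract_chunks_spec : Claim_equal_extract_chunks := by
  unfold Claim_equal_extract_chunks
  intro xs _ hpre
  unfold Spec_extract_chunks
  obtain ⟨hne, hx0⟩ := hpre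
  match xs, hne with
  | x :: rest, _ =>
    unfold extract_chunks_alt
    rcases eq_or_lt_of_le (show (0 : Int) ≤ x by simpa using hx0) with hx | hx
    · rw [← hx, extract_chunks_eq_of_zero rest]
    · rw [extract_chunks_eq_of_pos x rest hx]
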